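-- pv_equiv track=rewrite | github.com/DanteDeRuwe/fys-ster-programmeren-1 | Examen/Ex1.py | polka
-- ===== SOURCE A (Python) =====
-- def zoekvolgendestipindex(i, template):
--     while template[i%len(template)] != '.':
--         i = (i+1)%len(template)
--     return i
--
-- def polka(reeks):
--     '''
--     >>> polka((0, 2, 4, 6, 8, 10, 3, 7, 1, 9, 5))
--     [0, 1, 2, 3, 4, 5, 6, 7, 8, 9, 10]
--     >>> polka([0, 1, 2, 3, 4, 5, 6, 7, 8, 9, 10])
--     [0, 8, 1, 6, 2, 10, 3, 7, 4, 9, 5]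
--     >>> polka('ACEGIKMPDHLBJFO')
--     ['A', 'B', 'C', 'D', 'E', 'F', 'G', 'H', 'I', 'J', 'K', 'L', 'M', 'O', 'P']
--     >>> polka('ABCDEFGHIJKLMOP')
--     ['A', 'L', 'B', 'I', 'C', 'O', 'D', 'J', 'E', 'M', 'F', 'K', 'G', 'P', 'H']
--     '''
--     #werken met een lijst
--     lijst = list(reeks)
--
--     #maak een template met de eerste term van de lijst en puntjes als placeholders
--     template = [lijst[0]] + ['.']*(len(lijst)-1)
--     i = 0
--
--     for cijfer in lijst[1:]:
--         if template.count('.') >= 2: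
--
--             #zoek een stip, neem 1 positie verder, en zoek de volgende stip
--             i = zoekvolgendestipindex(i, template)
--             i = (i+1)%len(template)
--             i = zoekvolgendestipindex(i, template)
--
--             template[i] = cijfer
--
--         elif template.count('.') == 1:
--             template[template.index('.')] = cijfer
--
--     return template
-- ===== SOURCE B (Python) =====
-- def polka(reeks):
--     # O(n) queue of free slots (A rescans the template for every element).
--     lijst = list(reeks)
--     n = len(lijst)
--     result = [lijst[0]] + [None] * (n - 1)
--     free = list(range(1, n))   # free slot indices, cyclic order after the cursor
--     head = 0                   # queue read position (popleft without deque)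
--     for x in lijst[1:]:
--         if len(free) - head >= 2:
--             s = free[head]          # skip one free slot
--             f = free[head + 1]      # fill the next one
--             head += 2
--             result[f] = x
--             free.append(s)          # the skipped slot comes round again last
--         else:
--             result[free[head]] = x  # exactly one free slot left
--             head += 1
--     return result
-- ===== Notes on version B (the rewrite author's own statement) =====
-- stated objective: faster
-- what changed: Replaces A's per-element cyclic rescans of the template ('.'-count plus two linear next-dot searches) by a single O(1)-amortised queue of free slot indices kept in cyclic order: skip one, fill the next, requeue the skipped slot.
import Mathlib
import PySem

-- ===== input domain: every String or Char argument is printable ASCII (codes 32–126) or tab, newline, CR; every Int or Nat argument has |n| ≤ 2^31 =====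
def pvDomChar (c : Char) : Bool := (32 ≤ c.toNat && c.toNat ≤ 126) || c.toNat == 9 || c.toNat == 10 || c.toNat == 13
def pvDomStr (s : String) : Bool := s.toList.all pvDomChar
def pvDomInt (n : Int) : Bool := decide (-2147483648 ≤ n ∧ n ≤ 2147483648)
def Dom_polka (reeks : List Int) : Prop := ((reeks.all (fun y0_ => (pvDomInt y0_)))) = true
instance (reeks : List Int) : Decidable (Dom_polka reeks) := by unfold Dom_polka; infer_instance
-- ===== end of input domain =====

-- B replaces A's per-element cyclic rescans of the template by an O(1)-amortised queue
-- of free slot indices kept in cyclic order (objective: faster, O(n) vs O(n^2)).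
-- '.' placeholders are modelled as `none : Option Int`.

-- ===== PORT A =====
-- A's while-loop scans cyclically for the next '.'; it terminates only because a dot
-- exists whenever A calls it, so the port carries fuel = template.length (enough to
-- visit every position once); the fuel-exhausted value is never reached under Pre_.
def zoekvolgendestipindex (template : List (Option Int)) : Nat → Nat → Nat
  | 0, i => i
  | fuel+1, i =>
    if template.getD (i % template.length) (some 0) ≠ none then
      zoekvolgendestipindex template fuel ((i + 1) % template.length)
    else i

-- the body of A's `for cijfer in lijst[1:]` loop, state = (template, i)
def polkaStep (st : List (Option Int) × Nat) (cijfer : Int) : List (Option Int) × Nat :=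
  let template := st.1
  let i := st.2
  if 2 ≤ template.count none then
    let i1 := zoekvolgendestipindex template template.length i
    let i2 := (i1 + 1) % template.length
    let i3 := zoekvolgendestipindex template template.length i2
    (template.set i3 (some cijfer), i3)
  else if template.count none = 1 then
    (template.set (template.idxOf none) (some cijfer), i)
  else (template, i)

def polka (reeks : List Int) : List Int :=
  match reeks with
  | [] => []   -- Python raises IndexError on the first element here; excluded by Pre_polka
  | x :: _ =>
    let lijst := reeks
    let template : List (Option Int) := some x :: List.replicate (lijst.length - 1) none
    let res := (lijst.drop 1).foldl polkaStep (template, 0)   -- lijst[1:]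
    res.1.map (fun o => o.getD 0)

-- ===== PORT B =====
-- Source B's loop body, state = (result, free-slot queue); popleft = head of the list.
-- (Source B raises IndexError when the queue is empty — unreachable under Pre_polka;
-- the [] branch here is the structural no-op for that unreachable case.)
def polkaAltStep (st : List (Option Int) × List Nat) (x : Int) : List (Option Int) × List Nat :=
  match st.2 with
  | s :: f :: rs => (st.1.set f (some x), rs ++ [s])  -- skip s, fill f, requeue s
  | [d] => (st.1.set d (some x), [])                  -- exactly one free slot left
  | [] => st

def polka_alt (reeks : List Int) : List Int :=
  match reeks with
  | [] => []   -- Source B raises IndexError on the first element here; excluded by Pre_polka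
  | x :: rest =>
    let n := reeks.length
    let result : List (Option Int) := some x :: List.replicate (n - 1) none
    let free : List Nat := List.range' 1 (n - 1)      -- list(range(1, n))
    let st := rest.foldl polkaAltStep (result, free)
    st.1.map (fun o => o.getD 0)

-- ===== PRECONDITION & SPEC =====
-- Both programs index the first element: on the empty list Python A raises IndexError (and so
-- does B), hence the empty list is the only input excluded.
def Pre_polka (reeks : List Int) : Prop := reeks ≠ []
instance (reeks : List Int) : Decidable (Pre_polka reeks) := by unfold Pre_polka; infer_instance
def pvWitness_polka : List Int := [0, 1, 2, 3, 4]

def Spec_polka (reeks : List Int) (out : List Int) : Prop := out = polka_alt reeks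
instance (reeks : List Int) (out : List Int) : Decidable (Spec_polka reeks out) := by unfold Spec_polka; infer_instance

-- ===== CLAIM (what is proved, stated in full; the proofs are below) =====
def Claim_equal_polka : Prop := ∀ (reeks : List Int), Dom_polka reeks → Pre_polka reeks → Spec_polka reeks (polka reeks)

-- ===== LEMMAS AND PROOFS =====

-- the (increasing) list of free-slot positions of a template
def dotIdx (l : List (Option Int)) : List Nat :=
  (List.range l.length).filter (fun j => l.getD j (some 0) = none)

-- the free slots in cyclic order starting strictly after position i
def cyc (l : List (Option Int)) (i : Nat) : List Nat :=
  (dotIdx l).filter (fun j => i < j) ++ (dotIdx l).filter (fun j => j ≤ i)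

theorem mem_dotIdx (l : List (Option Int)) (j : Nat) :
    j ∈ dotIdx l ↔ j < l.length ∧ l.getD j (some 0) = none := by
  simp [dotIdx, List.mem_filter]

theorem sorted_dotIdx (l : List (Option Int)) : (dotIdx l).Pairwise (· < ·) := by
  exact List.Pairwise.sublist List.filter_sublist List.pairwise_lt_range

theorem sorted_eq_of_mem_iff {l₁ l₂ : List Nat}
    (h₁ : l₁.Pairwise (· < ·)) (h₂ : l₂.Pairwise (· < ·))
    (hm : ∀ x, x ∈ l₁ ↔ x ∈ l₂) : l₁ = l₂ := by
  have n₁ : l₁.Nodup := h₁.imp (fun h => Nat.ne_of_lt h)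
  have n₂ : l₂.Nodup := h₂.imp (fun h => Nat.ne_of_lt h)
  exact List.Perm.eq_of_pairwise (fun a b _ _ h h' => absurd h' (Nat.lt_asymm h)) h₁ h₂ ((List.perm_ext_iff_of_nodup n₁ n₂).mpr hm)

-- fuel-indexed characterisation of the scan
theorem zoekAux_eq (l : List (Option Int)) :
    ∀ (k fuel i : Nat), i < l.length → k < fuel →
      (∀ m, m < k → l.getD ((i + m) % l.length) (some 0) ≠ none) →
      l.getD ((i + k) % l.length) (some 0) = none →
      zoekvolgendestipindex l fuel i = (i + k) % l.length := by
  intro k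
  induction k with
  | zero =>
    intro fuel i hi hf _ hdot
    have him : i % l.length = i := Nat.mod_eq_of_lt hi
    rw [Nat.add_zero, him] at hdot ⊢
    cases fuel with
    | zero => omega
    | succ f =>
      rw [List.getD_eq_getElem?_getD] at hdot
      simp [zoekvolgendestipindex, him, List.getD_eq_getElem?_getD, hdot]
  | succ k ih =>
    intro fuel i hi hf hmin hdot
    cases fuel with
    | zero => omega
    | succ f =>
      have hlen : 0 < l.length := Nat.pos_of_ne_zero (by omega)
      have h0 : ¬ l.getD (i % l.length) (some 0) = none := by
        have := hmin 0 (Nat.succ_pos k)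
        simpa using this
      have key : ∀ m, ((i + 1) % l.length + m) % l.length = (i + (m + 1)) % l.length := by
        intro m
        rw [Nat.mod_add_mod]
        congr 1
        omega
      simp only [zoekvolgendestipindex, ne_eq, h0, not_false_iff, if_true]
      rw [ih f ((i + 1) % l.length) (Nat.mod_lt _ hlen) (by omega)
            (fun m hm => by rw [key m]; exact hmin (m + 1) (by omega))
            (by rw [key k]; exact hdot)]
      rw [key k]

-- the scan from p returns the first free slot at-or-after p, cyclically
theorem zoek_head (l : List (Option Int)) (p : Nat) (hp : p < l.length)
    (hne : dotIdx l ≠ []) :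
    zoekvolgendestipindex l l.length p =
      ((dotIdx l).filter (fun j => p ≤ j) ++ (dotIdx l).filter (fun j => j < p)).headD 0 := by
  have hpw : (dotIdx l).Pairwise (· < ·) := sorted_dotIdx l
  cases hF : (dotIdx l).filter (fun j => p ≤ j) with
  | cons h u =>
    have hmemF : h ∈ (dotIdx l).filter (fun j => p ≤ j) := by
      rw [hF]; exact List.mem_cons_self
    have hD : h ∈ dotIdx l := (List.mem_filter.mp hmemF).1
    have hph : p ≤ h := by simpa using (List.mem_filter.mp hmemF).2
    have hhlt : h < l.length := ((mem_dotIdx l h).mp hD).1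
    have hdot : l.getD h (some 0) = none := ((mem_dotIdx l h).mp hD).2
    have hu : ∀ x ∈ u, h < x := (List.pairwise_cons.mp (hF ▸ hpw.filter _)).1
    have hph' : (p + (h - p)) % l.length = h := by
      rw [Nat.mod_eq_of_lt (by omega)]; omega
    have hres := zoekAux_eq l (h - p) l.length p hp (by omega)
      (by
        intro m hm
        rw [Nat.mod_eq_of_lt (by omega)]
        intro hno
        have hx : p + m ∈ (dotIdx l).filter (fun j => p ≤ j) := by
          rw [List.mem_filter, mem_dotIdx]
          refine ⟨⟨by omega, hno⟩, by simpa using (by omega : p ≤ p + m)⟩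
        rw [hF] at hx
        rcases List.mem_cons.mp hx with h1 | h1
        · omega
        · exact absurd (hu _ h1) (by omega))
      (by rw [hph']; exact hdot)
    rw [hres, hph']; rfl
  | nil =>
    have hall : ∀ x ∈ dotIdx l, x < p := by
      intro x hx
      by_contra hge
      have hx2 : x ∈ (dotIdx l).filter (fun j => p ≤ j) := by
        rw [List.mem_filter]
        exact ⟨hx, by simpa using (by omega : p ≤ x)⟩
      rw [hF] at hx2
      exact absurd hx2 (List.not_mem_nil)
    obtain ⟨d, hd⟩ := List.exists_mem_of_ne_nil _ hne
    cases hG : (dotIdx l).filter (fun j => j < p) with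
    | nil =>
      exfalso
      have : d ∈ (dotIdx l).filter (fun j => j < p) := by
        rw [List.mem_filter]
        exact ⟨hd, by simpa using hall d hd⟩
      rw [hG] at this
      exact absurd this (List.not_mem_nil)
    | cons h u =>
      have hmemG : h ∈ (dotIdx l).filter (fun j => j < p) := by
        rw [hG]; exact List.mem_cons_self
      have hD : h ∈ dotIdx l := (List.mem_filter.mp hmemG).1
      have hhp : h < p := by simpa using (List.mem_filter.mp hmemG).2
      have hhlt : h < l.length := ((mem_dotIdx l h).mp hD).1
      have hdot : l.getD h (some 0) = none := ((mem_dotIdx l h).mp hD).2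
      have hu : ∀ x ∈ u, h < x := (List.pairwise_cons.mp (hG ▸ hpw.filter _)).1
      have hmod : (p + (l.length - p + h)) % l.length = h := by
        have h1 : p + (l.length - p + h) = l.length + h := by omega
        rw [h1, Nat.add_mod_left, Nat.mod_eq_of_lt (by omega)]
      have hres := zoekAux_eq l (l.length - p + h) l.length p hp (by omega)
        (by
          intro m hm
          by_cases hcase : p + m < l.length
          · rw [Nat.mod_eq_of_lt hcase]
            intro hno
            have : p + m ∈ dotIdx l := (mem_dotIdx l _).mpr ⟨hcase, hno⟩
            exact absurd (hall _ this) (by omega)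
          · rw [Nat.mod_eq_sub_mod (by omega), Nat.mod_eq_of_lt (by omega)]
            intro hno
            have hmem2 : p + m - l.length ∈ dotIdx l := (mem_dotIdx l _).mpr ⟨by omega, hno⟩
            have : p + m - l.length ∈ (dotIdx l).filter (fun j => j < p) := by
              rw [List.mem_filter]
              exact ⟨hmem2, by simpa using hall _ hmem2⟩
            rw [hG] at this
            rcases List.mem_cons.mp this with h1 | h1
            · omega
            · exact absurd (hu _ h1) (by omega))
        (by rw [hmod]; exact hdot)
      rw [hres, hmod]; rfl

-- rotation step: moving the cursor onto the head of the cyclic order rotates it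
theorem cyc_rot (l : List (Option Int)) (i s : Nat) (t : List Nat)
    (h : cyc l i = s :: t) : cyc l s = t ++ [s] := by
  have hpw := sorted_dotIdx l
  unfold cyc at h ⊢
  cases hG : (dotIdx l).filter (fun j => i < j) with
  | cons g u =>
    rw [hG, List.cons_append] at h
    injection h with h1 h2
    subst t
    subst g
    have hpwsu : (s :: u).Pairwise (· < ·) := hG ▸ hpw.filter _
    have hiu : ∀ x ∈ u, s < x := (List.pairwise_cons.mp hpwsu).1
    have his : i < s := by
      have : s ∈ (dotIdx l).filter (fun j => i < j) := by
        rw [hG]; exact List.mem_cons_self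
      simpa using (List.mem_filter.mp this).2
    have hsD : s ∈ dotIdx l := by
      have : s ∈ (dotIdx l).filter (fun j => i < j) := by
        rw [hG]; exact List.mem_cons_self
      exact (List.mem_filter.mp this).1
    have E1 : (dotIdx l).filter (fun j => s < j) = u := by
      apply sorted_eq_of_mem_iff (hpw.filter _) (List.pairwise_cons.mp hpwsu).2
      intro x
      simp only [List.mem_filter, decide_eq_true_eq]
      constructor
      · rintro ⟨hxD, hsx⟩
        have : x ∈ (dotIdx l).filter (fun j => i < j) := by
          rw [List.mem_filter]
          exact ⟨hxD, by simpa using (by omega : i < x)⟩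
        rw [hG] at this
        rcases List.mem_cons.mp this with h1 | h1
        · omega
        · exact h1
      · intro hxu
        have : x ∈ (dotIdx l).filter (fun j => i < j) := by
          rw [hG]; exact List.mem_cons_of_mem _ hxu
        exact ⟨(List.mem_filter.mp this).1, hiu _ hxu⟩
    have E2 : (dotIdx l).filter (fun j => j ≤ s) =
        (dotIdx l).filter (fun j => j ≤ i) ++ [s] := by
      apply sorted_eq_of_mem_iff (hpw.filter _)
      · rw [List.pairwise_append]
        refine ⟨hpw.filter _, List.pairwise_singleton _ _, ?_⟩
        intro x hx y hy
        have hxi : x ≤ i := by simpa using (List.mem_filter.mp hx).2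
        have : y = s := List.mem_singleton.mp hy
        omega
      · intro x
        simp only [List.mem_filter, List.mem_append, List.mem_singleton, decide_eq_true_eq]
        constructor
        · rintro ⟨hxD, hxs⟩
          by_cases hxi : x ≤ i
          · exact Or.inl ⟨hxD, by simpa using hxi⟩
          · have : x ∈ (dotIdx l).filter (fun j => i < j) := by
              rw [List.mem_filter]
              exact ⟨hxD, by simpa using (by omega : i < x)⟩
            rw [hG] at this
            rcases List.mem_cons.mp this with h1 | h1
            · exact Or.inr h1
            · exact absurd (hiu _ h1) (by omega)
        · rintro (⟨hxD, hxi⟩ | rfl)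
          · exact ⟨hxD, by omega⟩
          · exact ⟨hsD, le_refl _⟩
    rw [E1, E2, ← List.append_assoc]
  | nil =>
    rw [hG, List.nil_append] at h
    have hall : ∀ x ∈ dotIdx l, x ≤ i := by
      intro x hx
      by_contra hgt
      have : x ∈ (dotIdx l).filter (fun j => i < j) := by
        rw [List.mem_filter]
        exact ⟨hx, by simpa using (by omega : i < x)⟩
      rw [hG] at this
      exact absurd this (List.not_mem_nil)
    have hD_eq : dotIdx l = s :: t := by
      rw [← h]
      apply sorted_eq_of_mem_iff hpw (hpw.filter _)
      intro x
      simp only [List.mem_filter, decide_eq_true_eq]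
      exact ⟨fun hx => ⟨hx, hall x hx⟩, fun hx => hx.1⟩
    have hpwst : (s :: t).Pairwise (· < ·) := hD_eq ▸ hpw
    have hst : ∀ x ∈ t, s < x := (List.pairwise_cons.mp hpwst).1
    have E1 : (dotIdx l).filter (fun j => s < j) = t := by
      apply sorted_eq_of_mem_iff (hpw.filter _) (List.pairwise_cons.mp hpwst).2
      intro x
      simp only [List.mem_filter, decide_eq_true_eq]
      constructor
      · rintro ⟨hxD, hsx⟩
        rw [hD_eq] at hxD
        rcases List.mem_cons.mp hxD with h1 | h1
        · omega
        · exact h1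
      · intro hxt
        refine ⟨by rw [hD_eq]; exact List.mem_cons_of_mem _ hxt, hst _ hxt⟩
    have E2 : (dotIdx l).filter (fun j => j ≤ s) = [s] := by
      apply sorted_eq_of_mem_iff (hpw.filter _) (List.pairwise_singleton _ _)
      intro x
      simp only [List.mem_filter, List.mem_singleton, decide_eq_true_eq]
      constructor
      · rintro ⟨hxD, hxs⟩
        rw [hD_eq] at hxD
        rcases List.mem_cons.mp hxD with h1 | h1
        · exact h1
        · exact absurd (hst _ h1) (by omega)
      · rintro rfl
        exact ⟨by rw [hD_eq]; exact List.mem_cons_self, le_refl _⟩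
    rw [E1, E2]

-- filling slot f removes it from the free list
theorem dotIdx_set (l : List (Option Int)) (f : Nat) (c : Int)
    (hf : f < l.length) :
    dotIdx (l.set f (some c)) = (dotIdx l).filter (fun j => ¬ j = f) := by
  apply sorted_eq_of_mem_iff (sorted_dotIdx _) ((sorted_dotIdx l).filter _)
  intro x
  rw [mem_dotIdx, List.mem_filter, mem_dotIdx, List.length_set]
  by_cases hx : x = f
  · subst hx
    rw [List.getD_eq_getElem?_getD, List.getElem?_set_self hf]
    simp
  · rw [List.getD_eq_getElem?_getD, List.getElem?_set_ne (fun h => hx h.symm),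
        ← List.getD_eq_getElem?_getD]
    simp [hx]

theorem dotIdx_cons (a : Option Int) (l : List (Option Int)) :
    dotIdx (a :: l) = (if a = none then [0] else []) ++ (dotIdx l).map (· + 1) := by
  simp only [dotIdx, List.length_cons, List.range_succ_eq_map, List.filter_cons, List.filter_map]
  by_cases ha : a = none <;>
    · simp [ha, Function.comp_def]
      rfl

theorem cyc_set (l : List (Option Int)) (i s f : Nat) (rs : List Nat) (c : Int)
    (h : cyc l i = s :: f :: rs) : cyc (l.set f (some c)) f = rs ++ [s] := by
  have hpw := sorted_dotIdx l
  have h1 : cyc l s = f :: (rs ++ [s]) := by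
    have := cyc_rot l i s (f :: rs) h
    simpa using this
  have h2 : cyc l f = (rs ++ [s]) ++ [f] := cyc_rot l s f (rs ++ [s]) h1
  have hfD : f ∈ dotIdx l := by
    have hm : f ∈ cyc l s := by rw [h1]; exact List.mem_cons_self
    unfold cyc at hm
    rcases List.mem_append.mp hm with hx | hx
    · exact (List.mem_filter.mp hx).1
    · exact (List.mem_filter.mp hx).1
  have hflen : f < l.length := ((mem_dotIdx l f).mp hfD).1
  have E3 : (dotIdx l).filter (fun j => j ≤ f) =
      (dotIdx l).filter (fun j => j < f) ++ [f] := by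
    apply sorted_eq_of_mem_iff (hpw.filter _)
    · rw [List.pairwise_append]
      refine ⟨hpw.filter _, List.pairwise_singleton _ _, ?_⟩
      intro x hx y hy
      have hx' : x < f := by simpa using (List.mem_filter.mp hx).2
      have hy' : y = f := List.mem_singleton.mp hy
      omega
    · intro x
      simp only [List.mem_filter, List.mem_append, List.mem_singleton, decide_eq_true_eq]
      constructor
      · rintro ⟨hxD, hxf⟩
        by_cases hlt : x < f
        · exact Or.inl ⟨hxD, hlt⟩
        · exact Or.inr (by omega)
      · rintro (⟨hxD, hxf⟩ | rfl)
        · exact ⟨hxD, by omega⟩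
        · exact ⟨hfD, le_refl _⟩
  have hcancel : (dotIdx l).filter (fun j => f < j) ++ (dotIdx l).filter (fun j => j < f) =
      rs ++ [s] := by
    have h2' := h2
    unfold cyc at h2'
    rw [E3, ← List.append_assoc] at h2'
    exact List.append_cancel_right h2'
  unfold cyc
  rw [dotIdx_set l f c hflen]
  have F1 : ((dotIdx l).filter (fun j => ¬ j = f)).filter (fun j => f < j) =
      (dotIdx l).filter (fun j => f < j) := by
    apply sorted_eq_of_mem_iff ((hpw.filter _).filter _) (hpw.filter _)
    intro x
    simp only [List.mem_filter, decide_eq_true_eq]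
    constructor
    · rintro ⟨⟨hxD, _⟩, hfx⟩
      exact ⟨hxD, hfx⟩
    · rintro ⟨hxD, hfx⟩
      exact ⟨⟨hxD, by omega⟩, hfx⟩
  have F2 : ((dotIdx l).filter (fun j => ¬ j = f)).filter (fun j => j ≤ f) =
      (dotIdx l).filter (fun j => j < f) := by
    apply sorted_eq_of_mem_iff ((hpw.filter _).filter _) (hpw.filter _)
    intro x
    simp only [List.mem_filter, decide_eq_true_eq]
    constructor
    · rintro ⟨⟨hxD, hne⟩, hxf⟩
      exact ⟨hxD, by omega⟩
    · rintro ⟨hxD, hfx⟩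
      exact ⟨⟨hxD, by omega⟩, by omega⟩
  rw [F1, F2, hcancel]

theorem count_none_eq (l : List (Option Int)) : l.count none = (dotIdx l).length := by
  induction l with
  | nil => rfl
  | cons a l ih =>
    rw [dotIdx_cons, List.length_append, List.length_map, List.count_cons, ih]
    by_cases ha : a = none <;> simp [ha] <;> omega

theorem idxOf_none_head : ∀ (l : List (Option Int)) (d : Nat) (t : List Nat),
    dotIdx l = d :: t → l.idxOf none = d := by
  intro l
  induction l with
  | nil => intro d t h; simp [dotIdx] at h
  | cons a l ih =>
    intro d t h
    rw [dotIdx_cons] at h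
    by_cases ha : a = none
    · subst ha
      rw [if_pos rfl] at h
      have hd : d = 0 := by
        have := congrArg (fun xs => List.headD xs 0) h
        simpa using this.symm
      simp [hd]
    · rw [if_neg ha, List.nil_append] at h
      cases hD : dotIdx l with
      | nil => rw [hD] at h; simp at h
      | cons d' t' =>
        rw [hD, List.map_cons] at h
        injection h with h1 h2
        rw [List.idxOf_cons, show (a == none) = false from beq_eq_false_iff_ne.mpr ha,
            cond_false, ih d' t' hD, h1]

theorem idxOf_none_eq (l : List (Option Int)) (d : Nat) (h : dotIdx l = [d]) :
    l.idxOf none = d :=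
  idxOf_none_head l d [] h

theorem length_cyc (l : List (Option Int)) (i : Nat) :
    (cyc l i).length = (dotIdx l).length := by
  unfold cyc
  have he : (dotIdx l).filter (fun j => j ≤ i) =
      (dotIdx l).filter (fun j => !decide (i < j)) := by
    apply List.filter_congr
    intro x _
    by_cases h : i < x
    · simp [h, show ¬ x ≤ i by omega]
    · simp [h, show x ≤ i by omega]
  rw [he]
  exact (List.filter_append_perm _ _).length_eq

theorem mem_of_mem_cyc (l : List (Option Int)) (i x : Nat) (h : x ∈ cyc l i) :
    x ∈ dotIdx l := by
  unfold cyc at h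
  rcases List.mem_append.mp h with hx | hx
  · exact (List.mem_filter.mp hx).1
  · exact (List.mem_filter.mp hx).1

-- the main simulation invariant
theorem main_loop (rest : List Int) :
    ∀ (l : List (Option Int)) (i : Nat) (free : List Nat),
      i < l.length → l.getD i (some 0) ≠ none → free = cyc l i →
      free.length = rest.length →
      (rest.foldl polkaStep (l, i)).1 = (rest.foldl polkaAltStep (l, free)).1 := by
  induction rest with
  | nil => intro l i free _ _ _ _; rfl
  | cons c rest ih =>
    intro l i free hi hne hfree hlen
    have hlen0 : 0 < l.length := by omega
    have hcount : l.count none = rest.length + 1 := by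
      rw [count_none_eq, ← length_cyc l i, ← hfree, hlen, List.length_cons]
    subst hfree
    cases hcyc : cyc l i with
    | nil => rw [hcyc] at hlen; simp at hlen
    | cons s t =>
      have hDne : dotIdx l ≠ [] := by
        intro h0
        rw [cyc, h0] at hcyc
        simp at hcyc
      have hi_not : i ∉ dotIdx l := fun hm => hne ((mem_dotIdx l i).mp hm).2
      have hsmem : s ∈ dotIdx l :=
        mem_of_mem_cyc l i s (by rw [hcyc]; exact List.mem_cons_self)
      have hslen : s < l.length := ((mem_dotIdx l s).mp hsmem).1
      have hz1 : zoekvolgendestipindex l l.length i = s := by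
        rw [zoek_head l i hi hDne]
        have e1 : (dotIdx l).filter (fun j => i ≤ j) = (dotIdx l).filter (fun j => i < j) :=
          List.filter_congr (fun x hx => by
            have hxi : x ≠ i := fun hh => hi_not (hh ▸ hx)
            simp only [decide_eq_decide]
            omega)
        have e2 : (dotIdx l).filter (fun j => j < i) = (dotIdx l).filter (fun j => j ≤ i) :=
          List.filter_congr (fun x hx => by
            have hxi : x ≠ i := fun hh => hi_not (hh ▸ hx)
            simp only [decide_eq_decide]
            omega)
        rw [e1, e2]
        rw [show (dotIdx l).filter (fun j => i < j) ++ (dotIdx l).filter (fun j => j ≤ i) =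
              cyc l i from rfl, hcyc]
        rfl
      cases t with
      | nil =>
        have hrest : rest = [] := by
          rw [hcyc] at hlen
          simpa using hlen
        subst hrest
        have hD : dotIdx l = [s] := by
          have hlen1 : (dotIdx l).length = 1 := by rw [← length_cyc l i, hcyc]; rfl
          obtain ⟨a, ha⟩ := List.length_eq_one_iff.mp hlen1
          rw [ha] at hsmem
          rw [ha, List.mem_singleton.mp hsmem]
        have hcnt : l.count none = 1 := by rw [count_none_eq, hD]; rfl
        simp only [List.foldl_cons, List.foldl_nil, polkaStep, polkaAltStep]
        rw [hcnt, idxOf_none_eq l s hD]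
        norm_num
      | cons f rs =>
        have hcnt2 : 2 ≤ l.count none := by
          have : (cyc l i).length = rest.length + 1 := hlen
          rw [hcyc] at this
          simp at this
          rw [count_none_eq, ← length_cyc l i, hcyc]
          simp
        have hfmem : f ∈ dotIdx l :=
          mem_of_mem_cyc l i f (by rw [hcyc]; exact List.mem_cons_of_mem _ List.mem_cons_self)
        have hflen : f < l.length := ((mem_dotIdx l f).mp hfmem).1
        have hz2 : zoekvolgendestipindex l l.length ((s + 1) % l.length) = f := by
          rw [zoek_head l _ (Nat.mod_lt _ hlen0) hDne]
          have hcycs : cyc l s = f :: (rs ++ [s]) := by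
            have := cyc_rot l i s (f :: rs) hcyc
            simpa using this
          have hkey : (dotIdx l).filter (fun j => (s + 1) % l.length ≤ j) ++
              (dotIdx l).filter (fun j => j < (s + 1) % l.length) = cyc l s := by
            by_cases hs1 : s + 1 < l.length
            · rw [Nat.mod_eq_of_lt hs1]
              have e1 : (dotIdx l).filter (fun j => s + 1 ≤ j) =
                  (dotIdx l).filter (fun j => s < j) :=
                List.filter_congr (fun x _ => by simp only [decide_eq_decide]; omega)
              have e2 : (dotIdx l).filter (fun j => j < s + 1) =
                  (dotIdx l).filter (fun j => j ≤ s) :=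
                List.filter_congr (fun x _ => by simp only [decide_eq_decide]; omega)
              rw [e1, e2]
              rfl
            · have hs_eq : s + 1 = l.length := by omega
              have hp : (s + 1) % l.length = 0 := by rw [hs_eq, Nat.mod_self]
              rw [hp]
              have e1 : (dotIdx l).filter (fun j => 0 ≤ j) = dotIdx l :=
                List.filter_eq_self.mpr (fun x _ => by simp)
              have e2 : (dotIdx l).filter (fun j => j < 0) = [] :=
                List.filter_eq_nil_iff.mpr (fun x _ => by simp)
              have e3 : (dotIdx l).filter (fun j => s < j) = [] :=
                List.filter_eq_nil_iff.mpr (fun x hx => by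
                  have := ((mem_dotIdx l x).mp hx).1
                  simp only [decide_eq_true_eq]
                  omega)
              have e4 : (dotIdx l).filter (fun j => j ≤ s) = dotIdx l :=
                List.filter_eq_self.mpr (fun x hx => by
                  have := ((mem_dotIdx l x).mp hx).1
                  simp only [decide_eq_true_eq]
                  omega)
              rw [e1, e2]
              unfold cyc
              rw [e3, e4]
              simp
          rw [hkey, hcycs]
          rfl
        have hA : polkaStep (l, i) c = (l.set f (some c), f) := by
          simp only [polkaStep]
          rw [if_pos hcnt2, hz1, hz2]
        have hB : polkaAltStep (l, s :: f :: rs) c = (l.set f (some c), rs ++ [s]) := rfl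
        simp only [List.foldl_cons]
        rw [hA, hB]
        apply ih
        · rw [List.length_set]; exact hflen
        · rw [List.getD_eq_getElem?_getD, List.getElem?_set_self hflen]
          simp
        · exact (cyc_set l i s f rs c hcyc).symm
        · have : (cyc l i).length = rest.length + 1 := hlen
          rw [hcyc] at this
          simp at this ⊢
          omega

theorem dotIdx_init (x : Int) (m : Nat) :
    dotIdx (some x :: List.replicate m none) = List.range' 1 m := by
  have hrep : ∀ k, dotIdx (List.replicate k none) = List.range k := by
    intro k
    induction k with
    | zero => rfl
    | succ k ih =>
      rw [List.replicate_succ, dotIdx_cons, if_pos rfl, ih, List.range_succ_eq_map]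
      rfl
  rw [dotIdx_cons, if_neg (by simp), hrep, List.nil_append, List.range'_eq_map_range]
  exact List.map_congr_left (fun a _ => by omega)

theorem polka_spec' : ∀ (reeks : List Int), Pre_polka reeks → polka reeks = polka_alt reeks := by
  intro reeks hpre
  match reeks with
  | [] => exact absurd rfl hpre
  | x :: rest =>
    simp only [polka, polka_alt]
    congr 1
    apply main_loop
    · simp
    · simp
    · -- range' 1 rest.length = cyc template 0
      have hD : dotIdx (some x :: List.replicate ((x :: rest).length - 1) none) =
          List.range' 1 rest.length := by
        rw [List.length_cons, Nat.add_sub_cancel, dotIdx_init]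
      unfold cyc
      rw [hD]
      have e1 : (List.range' 1 rest.length).filter (fun j => 0 < j) = List.range' 1 rest.length :=
        List.filter_eq_self.mpr (fun a ha => by
          have := (List.mem_range'_1.mp ha).1
          simp only [decide_eq_true_eq]
          omega)
      have e2 : (List.range' 1 rest.length).filter (fun j => j ≤ 0) = [] :=
        List.filter_eq_nil_iff.mpr (fun a ha => by
          have := (List.mem_range'_1.mp ha).1
          simp only [decide_eq_true_eq]
          omega)
      rw [e1, e2, List.append_nil, List.length_cons, Nat.add_sub_cancel]
    · simp

-- ===== VERDICT (by name: the statement is the Claim_ definition above) =====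
theorem polka_spec : Claim_equal_polka := by
  intro reeks _ hpre
  exact polka_spec' reeks hpre
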